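-- pv_equiv track=rewrite | github.com/jms7446/hackerrank | baekjoon/alg-study/w21/p5_p14426.py | solve_bisect
-- ===== SOURCE A (Python) =====
-- from bisect import bisect_left
--
-- def solve_bisect(corpus, texts):
--     corpus = sorted(corpus)
--     count = 0
--     for text in texts:
--         idx = bisect_left(corpus, text)
--         if idx < len(corpus) and corpus[idx].startswith(text):
--             count += 1
--     return count
-- ===== SOURCE B (Python) =====
-- def solve_bisect(corpus, texts):
--     prefixes = set()
--     for w in corpus:
--         for i in range(len(w) + 1):
--             prefixes.add(w[:i])
--     count = 0
--     for t in texts: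
--         if t in prefixes:
--             count += 1
--     return count
-- ===== Notes on version B (the rewrite author's own statement) =====
-- stated objective: faster
-- what changed: Replaces sort + per-text binary search with a hash set of all corpus-word prefixes built once, so each text is answered by a single expected-O(L) set lookup instead of an O(L log N) bisect over the sorted corpus.
import Mathlib
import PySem

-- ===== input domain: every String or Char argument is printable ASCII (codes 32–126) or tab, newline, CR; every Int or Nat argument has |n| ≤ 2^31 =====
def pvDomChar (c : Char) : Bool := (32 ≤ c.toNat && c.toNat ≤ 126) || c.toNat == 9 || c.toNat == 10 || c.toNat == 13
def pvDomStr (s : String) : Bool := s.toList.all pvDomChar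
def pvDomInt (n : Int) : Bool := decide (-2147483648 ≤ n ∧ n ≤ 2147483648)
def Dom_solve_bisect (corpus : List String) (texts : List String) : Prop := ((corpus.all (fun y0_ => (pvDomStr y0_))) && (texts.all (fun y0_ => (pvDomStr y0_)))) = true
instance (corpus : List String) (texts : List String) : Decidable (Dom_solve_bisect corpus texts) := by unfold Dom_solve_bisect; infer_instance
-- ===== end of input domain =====

-- B replaces A's sort + per-text binary search by a set of all corpus-word prefixes built once, answering each text with one set lookup.

-- ===== PORT A =====
def solve_bisect (corpus : List String) (texts : List String) : Int :=
  let c := PySem.List.sorted corpus (fun x => x) false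
  texts.foldl (fun count text =>
    let idx := PySem.List.bisectLeft c text
    if idx < c.length then
      if PySem.Str.startswith (c.getD idx "") text then count + 1 else count
    else count) 0

-- ===== PORT B =====
def solve_bisect_alt (corpus : List String) (texts : List String) : Int :=
  let prefixes : PySem.Set String :=
    corpus.foldl (fun s w =>
      (PySem.List.pyRange 0 ((PySem.Str.len w : Int) + 1) 1).foldl
        (fun s i => PySem.Set.add s (PySem.Str.slice w none (some i))) s)
      PySem.Set.empty
  texts.foldl (fun count t =>
    if PySem.Set.contains prefixes t then count + 1 else count) 0

-- ===== PRECONDITION & SPEC =====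
def Spec_solve_bisect (corpus : List String) (texts : List String) (out : Int) : Prop := out = solve_bisect_alt corpus texts
instance (corpus : List String) (texts : List String) (out : Int) : Decidable (Spec_solve_bisect corpus texts out) := by unfold Spec_solve_bisect; infer_instance

-- ===== CLAIM (what is proved, stated in full; the proofs are below) =====
def Claim_equal_solve_bisect : Prop := ∀ (corpus : List String) (texts : List String), Dom_solve_bisect corpus texts → Spec_solve_bisect corpus texts (solve_bisect corpus texts)

-- ===== LEMMAS AND PROOFS =====

-- One inner loop of B: which strings are in the set after all prefixes of w are added.
theorem pv_mem_inner (w : String) (s : PySem.Set String) (y : String) :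
    y ∈ (PySem.List.pyRange 0 ((PySem.Str.len w : Int) + 1) 1).foldl
          (fun s i => PySem.Set.add s (PySem.Str.slice w none (some i))) s
      ↔ y ∈ s ∨ y.toList <+: w.toList := by
  rw [PySem.Set.mem_foldl_add]
  apply or_congr_right
  constructor
  · rintro ⟨i, hi, rfl⟩
    rw [PySem.List.mem_pyRange_one] at hi
    have h : (PySem.Str.slice w none (some i)).toList = w.toList.take i.toNat := by
      simp [PySem.List.slice_to (xs := w.toList) hi.1]
    rw [h]
    exact List.take_prefix _ _
  · intro hp
    refine ⟨(y.toList.length : Int), ?_, ?_⟩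
    · rw [PySem.List.mem_pyRange_one]
      have := hp.length_le
      simp [PySem.Str.len] at *
      omega
    · have hl : (PySem.Str.slice w none (some (y.toList.length : Int))).toList
          = w.toList.take y.toList.length := by
        simp
      have ht := List.prefix_iff_eq_take.mp hp
      apply String.toList_inj.mp
      rw [hl, ← ht]

-- B's prefix set contains exactly the strings that prefix some corpus word.
theorem pv_mem_prefixes (ws : List String) (s : PySem.Set String) (y : String) :
    y ∈ ws.foldl (fun s w =>
        (PySem.List.pyRange 0 ((PySem.Str.len w : Int) + 1) 1).foldl
          (fun s i => PySem.Set.add s (PySem.Str.slice w none (some i))) s) s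
      ↔ y ∈ s ∨ ∃ w ∈ ws, y.toList <+: w.toList := by
  induction ws generalizing s with
  | nil => simp
  | cons w ws ih =>
    rw [List.foldl_cons, ih, pv_mem_inner]
    simp only [List.mem_cons]
    constructor
    · rintro (⟨h | h⟩ | ⟨u, hu, hp⟩)
      · exact Or.inl h
      · exact Or.inr ⟨w, Or.inl rfl, h⟩
      · exact Or.inr ⟨u, Or.inr hu, hp⟩
    · rintro (h | ⟨u, (rfl | hu), hp⟩)
      · exact Or.inl (Or.inl h)
      · exact Or.inl (Or.inr hp)
      · exact Or.inr ⟨u, hu, hp⟩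

-- a prefix is never lexicographically greater than the word it prefixes
theorem pv_not_lex_of_prefix (t w : List Char) (hp : t <+: w) : ¬ List.Lex (·<·) w t := by
  induction t generalizing w with
  | nil => intro h; cases h
  | cons a t' ih =>
    obtain ⟨w', rfl⟩ := hp
    intro h
    rw [List.cons_append, List.lex_cons_iff] at h
    exact ih (t' ++ w') (List.prefix_append t' w') h

-- lexicographic sandwich: a list between t and an extension of t is itself an extension of t
theorem pv_sandwich_lex (t s w : List Char)
    (h1 : ¬ List.Lex (·<·) s t) (h2 : ¬ List.Lex (·<·) w s) (hp : t <+: w) : t <+: s := by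
  induction t generalizing s w with
  | nil => exact List.nil_prefix
  | cons a t' ih =>
    obtain ⟨w', rfl⟩ := hp
    cases s with
    | nil => exact absurd List.Lex.nil h1
    | cons b s' =>
      rcases lt_trichotomy a b with hab | rfl | hba
      · exact absurd (List.Lex.rel hab) h2
      · refine List.cons_prefix_cons.mpr ⟨rfl, ih s' (t' ++ w') ?_ ?_ (List.prefix_append t' w')⟩
        · exact fun h => h1 (List.Lex.cons h)
        · exact fun h => h2 (by rw [List.cons_append]; exact List.Lex.cons h)
      · exact absurd (List.Lex.rel hba) h1

theorem pv_prefix_le (t w : String) (hp : t.toList <+: w.toList) : t ≤ w := by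
  rw [String.le_iff_toList_le]
  exact not_lt.mp (pv_not_lex_of_prefix _ _ hp)

theorem pv_sandwich (t s w : String) (h1 : t ≤ s) (h2 : s ≤ w)
    (hp : t.toList <+: w.toList) : t.toList <+: s.toList := by
  rw [String.le_iff_toList_le, ← not_lt] at h1 h2
  exact pv_sandwich_lex _ _ _ h1 h2 hp

theorem pv_mono (xs : List String) (hs : xs.Pairwise (· ≤ ·)) (j k : Nat)
    (hj : j < xs.length) (hk : k < xs.length) (h : j ≤ k) : xs[j] ≤ xs[k] := by
  rcases eq_or_lt_of_le h with rfl | h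
  · exact le_refl _
  · exact List.pairwise_iff_getElem.mp hs j k hj hk h

-- the binary-search loop of bisect_left, characterised on a ≤-sorted list of strings
theorem pv_bisectLoop_spec (xs : List String) (x : String)
    (hs : xs.Pairwise (· ≤ ·)) :
    ∀ (fuel lo hi : Nat), lo ≤ hi → hi ≤ xs.length → hi - lo ≤ fuel →
      (∀ (j : Nat) (hj : j < xs.length), j < lo → xs[j] < x) →
      (∀ (j : Nat) (hj : j < xs.length), hi ≤ j → x ≤ xs[j]) →
      lo ≤ PySem.List.bisectLeftLoop xs x fuel lo hi ∧
      PySem.List.bisectLeftLoop xs x fuel lo hi ≤ hi ∧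
      (∀ (j : Nat) (hj : j < xs.length), j < PySem.List.bisectLeftLoop xs x fuel lo hi → xs[j] < x) ∧
      (∀ (j : Nat) (hj : j < xs.length), PySem.List.bisectLeftLoop xs x fuel lo hi ≤ j → x ≤ xs[j]) := by
  intro fuel
  induction fuel with
  | zero =>
    intro lo hi hlh hhl hfuel hlow hhigh
    simp only [PySem.List.bisectLeftLoop]
    exact ⟨le_refl _, hlh, hlow, fun j hj h => hhigh j hj (by omega)⟩
  | succ fuel ih =>
    intro lo hi hlh hhl hfuel hlow hhigh
    rw [PySem.List.bisectLeftLoop]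
    by_cases hlt : lo < hi
    · simp only [if_pos hlt]
      have hmid : (lo + hi) / 2 < xs.length := by omega
      rw [List.getElem?_eq_getElem hmid]
      by_cases hy : xs[(lo + hi) / 2] < x
      · simp only [if_pos hy]
        have h := ih ((lo + hi) / 2 + 1) hi (by omega) hhl (by omega)
          (fun j hj hjlt => lt_of_le_of_lt (pv_mono xs hs j _ hj hmid (by omega)) hy)
          hhigh
        exact ⟨by omega, h.2.1, h.2.2.1, h.2.2.2⟩
      · simp only [if_neg hy]
        have h := ih lo ((lo + hi) / 2) (by omega) (by omega) (by omega) hlow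
          (fun j hj hjge => le_trans (not_lt.mp hy) (pv_mono xs hs _ j hmid hj hjge))
        exact ⟨h.1, by omega, h.2.2.1, h.2.2.2⟩
    · simp only [if_neg hlt]
      have : lo = hi := by omega
      subst this
      exact ⟨le_refl _, le_refl _, hlow, hhigh⟩

theorem pv_bisect_spec (xs : List String) (x : String) (hs : xs.Pairwise (· ≤ ·)) :
    PySem.List.bisectLeft xs x ≤ xs.length ∧
    (∀ (j : Nat) (hj : j < xs.length), j < PySem.List.bisectLeft xs x → xs[j] < x) ∧
    (∀ (j : Nat) (hj : j < xs.length), PySem.List.bisectLeft xs x ≤ j → x ≤ xs[j]) := by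
  have h := pv_bisectLoop_spec xs x hs xs.length 0 xs.length (Nat.zero_le _) (le_refl _) (by omega)
    (fun j hj h => by omega) (fun j hj h => by omega)
  exact ⟨h.2.1, h.2.2.1, h.2.2.2⟩

-- A's per-text test on the sorted corpus hits exactly the texts that prefix some corpus word.
theorem pv_condA_iff (cs : List String) (t : String) (hs : cs.Pairwise (· ≤ ·)) :
    (PySem.List.bisectLeft cs t < cs.length ∧
      PySem.Str.startswith (cs.getD (PySem.List.bisectLeft cs t) "") t = true)
      ↔ ∃ w ∈ cs, t.toList <+: w.toList := by
  obtain ⟨hlen, hlow, hhigh⟩ := pv_bisect_spec cs t hs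
  constructor
  · rintro ⟨hidx, hsw⟩
    rw [List.getD_eq_getElem cs "" hidx] at hsw
    exact ⟨_, List.getElem_mem hidx, by simpa [PySem.Chars.startswith_iff] using hsw⟩
  · rintro ⟨w, hw, hp⟩
    obtain ⟨j, hj, rfl⟩ := List.mem_iff_getElem.mp hw
    have hle : t ≤ cs[j]'hj := pv_prefix_le _ _ hp
    have hij : PySem.List.bisectLeft cs t ≤ j := by
      by_contra hcon
      exact absurd hle (not_le.mpr (hlow j hj (by omega)))
    have hidx : PySem.List.bisectLeft cs t < cs.length := lt_of_le_of_lt hij hj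
    refine ⟨hidx, ?_⟩
    rw [List.getD_eq_getElem cs "" hidx]
    have h1 : t ≤ cs[PySem.List.bisectLeft cs t]'hidx := hhigh _ hidx (le_refl _)
    have h2 : cs[PySem.List.bisectLeft cs t]'hidx ≤ cs[j]'hj := pv_mono cs hs _ j hidx hj hij
    simpa [PySem.Chars.startswith_iff] using pv_sandwich t _ _ h1 h2 hp

-- ===== VERDICT (by name: the statement is the Claim_ definition above) =====
theorem solve_bisect_spec : Claim_equal_solve_bisect := by
  intro corpus texts _
  unfold Spec_solve_bisect solve_bisect solve_bisect_alt
  apply PySem.List.foldl_congr_mem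
  intro acc t _
  dsimp only
  have hs : (PySem.List.sorted corpus (fun x => x) false).Pairwise (· ≤ ·) :=
    PySem.List.sorted_pairwise corpus (fun x => x)
  have hcond := pv_condA_iff (PySem.List.sorted corpus (fun x => x) false) t hs
  simp only [PySem.List.mem_sorted] at hcond
  have hR : PySem.Set.contains
      (corpus.foldl (fun s w =>
        (PySem.List.pyRange 0 ((PySem.Str.len w : Int) + 1) 1).foldl
          (fun s i => PySem.Set.add s (PySem.Str.slice w none (some i))) s)
        PySem.Set.empty) t = true ↔ ∃ w ∈ corpus, t.toList <+: w.toList := by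
    rw [PySem.Set.contains_iff, pv_mem_prefixes]
    constructor
    · rintro (h | h)
      · cases h
      · exact h
    · exact Or.inr
  have hAB := hcond.trans hR.symm
  split_ifs with h1 h2 h3 h4 h5
  · rfl
  · exact absurd (hAB.mp ⟨h1, h2⟩) h3
  · exact absurd (hAB.mpr h4).2 h2
  · rfl
  · exact absurd (hAB.mpr h5).1 h1
  · rfl
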